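-- pv_equiv track=rewrite | github.com/hiro4honda/phoneme-balance-sentence-extractor | extract_balance_sentence.py | count_phoneme_chain3
-- ===== SOURCE A (Python) =====
-- phoneVowel = ['a', 'i', 'u', 'e', 'o']
--
-- silentFricativePlosiveConsonant = ['s', 'sh', 'h', 'hy', 'f', 'k', 'ky', 'kw', 't', 'ts', 'ch', 'ty', 'p', 'py']
--
-- nasalConsonant = ['g', 'gy', 'gw', 'n', 'ny', 'm', 'my', 'N']
--
-- halfVowel = ['w','y']
--
-- def count_phoneme_chain3(phonemes):
--
--     cvc1_dic = {}
--     cvc2_dic = {}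
--     vcv_dic = {}
--
--     for i in range(0, len(silentFricativePlosiveConsonant)):
--         for j in range(0, len(phoneVowel)):
--                 for k in range(0, len(silentFricativePlosiveConsonant)):
--                     cvc1_dic[silentFricativePlosiveConsonant[i] + ' ' + phoneVowel[j] + ' ' + silentFricativePlosiveConsonant[k]] = 0
--
--     for i in range(0, len(nasalConsonant)):
--         for j in range(0, len(phoneVowel)):
--                 for k in range(0, len(nasalConsonant)):
--                     cvc2_dic[nasalConsonant[i] + ' ' + phoneVowel[j] + ' ' + nasalConsonant[k]] = 0
--
--     for i in range(0, len(phoneVowel)):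
--         for j in range(0, len(halfVowel)):
--                 for k in range(0, len(phoneVowel)):
--                     vcv_dic[phoneVowel[i] + ' ' + halfVowel[j] + ' ' + phoneVowel[k]] = 0
--
--
--     for i in range(0, len(phonemes)):
--         w = phonemes[i].split()
--         for j in range(2, len(w)):
--             key = w[j-2] + ' ' + w[j-1] + ' ' + w[j]
--             if key in cvc1_dic:
--                 val = cvc1_dic[key]
--                 cvc1_dic[key] = val + 1
--
--             if key in cvc2_dic:
--                 val = cvc2_dic[key]
--                 cvc2_dic[key] = val + 1
--
--             if key in vcv_dic:
--                 val = vcv_dic[key]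
--                 vcv_dic[key] = val + 1
--
--     return cvc1_dic, cvc2_dic, vcv_dic
-- ===== SOURCE B (Python) =====
-- phoneVowel = ['a', 'i', 'u', 'e', 'o']
--
-- silentFricativePlosiveConsonant = ['s', 'sh', 'h', 'hy', 'f', 'k', 'ky', 'kw', 't', 'ts', 'ch', 'ty', 'p', 'py']
--
-- nasalConsonant = ['g', 'gy', 'gw', 'n', 'ny', 'm', 'my', 'N']
--
-- halfVowel = ['w', 'y']
--
-- def _universe_counts(counts, first, mid, last):
--     # one pass over the full key universe, reading the pre-built window counter
--     return {x + ' ' + y + ' ' + z: counts.get(x + ' ' + y + ' ' + z, 0)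
--             for x in first for y in mid for z in last}
--
-- def count_phoneme_chain3(phonemes):
--     # single scan: count every 3-token window once, with no per-dict membership tests
--     counts = {}
--     for line in phonemes:
--         w = line.split()
--         for a, b, c in zip(w, w[1:], w[2:]):
--             k = a + ' ' + b + ' ' + c
--             counts[k] = counts.get(k, 0) + 1
--     return (_universe_counts(counts, silentFricativePlosiveConsonant, phoneVowel, silentFricativePlosiveConsonant),
--             _universe_counts(counts, nasalConsonant, phoneVowel, nasalConsonant),
--             _universe_counts(counts, phoneVowel, halfVowel, phoneVowel))
-- ===== Notes on version B (the rewrite author's own statement) =====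
-- stated objective: alternative
-- what changed: A pre-seeds three full product-universe dicts with zeros and, while scanning, tests each window key for membership in all three dicts; B makes one pass counting every 3-token window into a single counter dict and then builds each result dict in one comprehension over its key universe, reading counter.get(key, 0).
import Mathlib
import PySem

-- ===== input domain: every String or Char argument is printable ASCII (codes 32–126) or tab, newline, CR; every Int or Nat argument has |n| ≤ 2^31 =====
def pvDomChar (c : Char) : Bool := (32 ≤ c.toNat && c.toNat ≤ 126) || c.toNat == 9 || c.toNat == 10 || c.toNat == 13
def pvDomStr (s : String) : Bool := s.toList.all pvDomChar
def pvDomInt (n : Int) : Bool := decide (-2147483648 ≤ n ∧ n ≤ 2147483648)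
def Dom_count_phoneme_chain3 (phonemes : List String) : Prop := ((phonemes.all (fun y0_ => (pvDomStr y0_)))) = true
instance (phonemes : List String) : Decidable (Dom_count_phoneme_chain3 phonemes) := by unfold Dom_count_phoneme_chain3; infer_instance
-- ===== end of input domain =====

-- B replaces A's three pre-seeded dicts with per-key membership tests during the scan by one
-- single-pass window counter followed by a universe-driven build of each dict (objective: alternative).

set_option maxRecDepth 40000

-- module-level constants shared by both Pythons
def phoneVowel : List String := ["a", "i", "u", "e", "o"]
def silentFricativePlosiveConsonant : List String :=
  ["s", "sh", "h", "hy", "f", "k", "ky", "kw", "t", "ts", "ch", "ty", "p", "py"]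
def nasalConsonant : List String := ["g", "gy", "gw", "n", "ny", "m", "my", "N"]
def halfVowel : List String := ["w", "y"]

-- ===== PORT A =====
-- literal transliteration: three index-loop dict initialisations, then an index-loop scan that
-- increments each dict under a membership test ('val = d[key]' under 'key in d' is getD with any default)
def count_phoneme_chain3 (phonemes : List String) :
    (List (String × Int)) × (List (String × Int)) × (List (String × Int)) :=
  let cvc1_dic : PySem.Dict String Int :=
    (PySem.List.pyRange 0 (PySem.List.len silentFricativePlosiveConsonant) 1).foldl (fun d i =>
      (PySem.List.pyRange 0 (PySem.List.len phoneVowel) 1).foldl (fun d j =>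
        (PySem.List.pyRange 0 (PySem.List.len silentFricativePlosiveConsonant) 1).foldl (fun d k =>
          d.insert (PySem.List.pyGetD silentFricativePlosiveConsonant i "" ++ " " ++
            PySem.List.pyGetD phoneVowel j "" ++ " " ++
            PySem.List.pyGetD silentFricativePlosiveConsonant k "") 0) d) d) PySem.Dict.empty
  let cvc2_dic : PySem.Dict String Int :=
    (PySem.List.pyRange 0 (PySem.List.len nasalConsonant) 1).foldl (fun d i =>
      (PySem.List.pyRange 0 (PySem.List.len phoneVowel) 1).foldl (fun d j =>
        (PySem.List.pyRange 0 (PySem.List.len nasalConsonant) 1).foldl (fun d k =>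
          d.insert (PySem.List.pyGetD nasalConsonant i "" ++ " " ++
            PySem.List.pyGetD phoneVowel j "" ++ " " ++
            PySem.List.pyGetD nasalConsonant k "") 0) d) d) PySem.Dict.empty
  let vcv_dic : PySem.Dict String Int :=
    (PySem.List.pyRange 0 (PySem.List.len phoneVowel) 1).foldl (fun d i =>
      (PySem.List.pyRange 0 (PySem.List.len halfVowel) 1).foldl (fun d j =>
        (PySem.List.pyRange 0 (PySem.List.len phoneVowel) 1).foldl (fun d k =>
          d.insert (PySem.List.pyGetD phoneVowel i "" ++ " " ++
            PySem.List.pyGetD halfVowel j "" ++ " " ++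
            PySem.List.pyGetD phoneVowel k "") 0) d) d) PySem.Dict.empty
  let st :=
    (PySem.List.pyRange 0 (PySem.List.len phonemes) 1).foldl (fun st i =>
      let w := PySem.Str.split₀ (PySem.List.pyGetD phonemes i "")
      (PySem.List.pyRange 2 (PySem.List.len w) 1).foldl (fun st j =>
        let key := PySem.List.pyGetD w (j - 2) "" ++ " " ++
          PySem.List.pyGetD w (j - 1) "" ++ " " ++ PySem.List.pyGetD w j ""
        (if st.1.contains key then st.1.insert key (st.1.getD key 0 + 1) else st.1,
         if st.2.1.contains key then st.2.1.insert key (st.2.1.getD key 0 + 1) else st.2.1,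
         if st.2.2.contains key then st.2.2.insert key (st.2.2.getD key 0 + 1) else st.2.2)) st)
      (cvc1_dic, cvc2_dic, vcv_dic)
  (st.1.items, st.2.1.items, st.2.2.items)

-- ===== PORT B =====
-- _universe_counts: a dict comprehension over a product universe; its keys are pairwise distinct,
-- so the resulting dict's association list is exactly this flatMap list
def pvMkUniv (counts : PySem.Dict String Int) (first mid last : List String) :
    List (String × Int) :=
  first.flatMap (fun x => mid.flatMap (fun y => last.map (fun z =>
    (x ++ " " ++ y ++ " " ++ z, counts.getD (x ++ " " ++ y ++ " " ++ z) 0))))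

-- literal transliteration of Source B: one counting scan over zip(w, w[1:], w[2:]), then three universe builds
def count_phoneme_chain3_alt (phonemes : List String) :
    (List (String × Int)) × (List (String × Int)) × (List (String × Int)) :=
  let counts : PySem.Dict String Int :=
    phonemes.foldl (fun counts line =>
      let w := PySem.Str.split₀ line
      ((w.zip (PySem.List.slice w (some 1) none)).zip (PySem.List.slice w (some 2) none)).foldl
        (fun counts t =>
          let k := t.1.1 ++ " " ++ t.1.2 ++ " " ++ t.2
          counts.insert k (counts.getD k 0 + 1)) counts) PySem.Dict.empty
  (pvMkUniv counts silentFricativePlosiveConsonant phoneVowel silentFricativePlosiveConsonant,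
   pvMkUniv counts nasalConsonant phoneVowel nasalConsonant,
   pvMkUniv counts phoneVowel halfVowel phoneVowel)

-- ===== PRECONDITION & SPEC =====
def Spec_count_phoneme_chain3 (phonemes : List String) (out : (List (String × Int)) × (List (String × Int)) × (List (String × Int))) : Prop := out = count_phoneme_chain3_alt phonemes
instance (phonemes : List String) (out : (List (String × Int)) × (List (String × Int)) × (List (String × Int))) : Decidable (Spec_count_phoneme_chain3 phonemes out) := by unfold Spec_count_phoneme_chain3; infer_instance

-- ===== CLAIM (what is proved, stated in full; the proofs are below) =====
def Claim_equal_count_phoneme_chain3 : Prop := ∀ (phonemes : List String), Dom_count_phoneme_chain3 phonemes → Spec_count_phoneme_chain3 phonemes (count_phoneme_chain3 phonemes)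

-- ===== LEMMAS AND PROOFS =====

-- proof-side vocabulary
def pvKey3 (a b c : String) : String := a ++ " " ++ b ++ " " ++ c
def pvUniv (xs ys zs : List String) : List String :=
  xs.flatMap (fun a => ys.flatMap (fun b => zs.map (fun c => pvKey3 a b c)))
def pvDec (s : String) : String × String × String :=
  match PySem.Str.split₀ s with
  | [a, b, c] => (a, b, c)
  | _ => ("", "", "")
def pvTriples (xs ys zs : List String) : List (String × String × String) :=
  xs.flatMap (fun a => ys.flatMap (fun b => zs.map (fun c => (a, b, c))))
def pvWinKeys (w : List String) : List String :=
  ((w.zip (w.drop 1)).zip (w.drop 2)).map (fun t => t.1.1 ++ " " ++ t.1.2 ++ " " ++ t.2)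
def pvWs (phonemes : List String) : List String :=
  phonemes.flatMap (fun line => pvWinKeys (PySem.Str.split₀ line))

-- the generic shape of one of A's dict initialisations
def pvInit (xs ys zs : List String) : PySem.Dict String Int :=
  (PySem.List.pyRange 0 (PySem.List.len xs) 1).foldl (fun d i =>
    (PySem.List.pyRange 0 (PySem.List.len ys) 1).foldl (fun d j =>
      (PySem.List.pyRange 0 (PySem.List.len zs) 1).foldl (fun d k =>
        d.insert (PySem.List.pyGetD xs i "" ++ " " ++ PySem.List.pyGetD ys j "" ++ " " ++
          PySem.List.pyGetD zs k "") 0) d) d) PySem.Dict.empty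

-- A's per-key update and its triple form; A's loop bodies
def pvUpd (d : PySem.Dict String Int) (key : String) : PySem.Dict String Int :=
  if d.contains key then d.insert key (d.getD key 0 + 1) else d
def pvUpdT (st : PySem.Dict String Int × PySem.Dict String Int × PySem.Dict String Int)
    (key : String) : PySem.Dict String Int × PySem.Dict String Int × PySem.Dict String Int :=
  (pvUpd st.1 key, pvUpd st.2.1 key, pvUpd st.2.2 key)
def pvKeyStep (w : List String)
    (st : PySem.Dict String Int × PySem.Dict String Int × PySem.Dict String Int) (j : Int) :
    PySem.Dict String Int × PySem.Dict String Int × PySem.Dict String Int :=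
  let key := PySem.List.pyGetD w (j - 2) "" ++ " " ++
    PySem.List.pyGetD w (j - 1) "" ++ " " ++ PySem.List.pyGetD w j ""
  (if st.1.contains key then st.1.insert key (st.1.getD key 0 + 1) else st.1,
   if st.2.1.contains key then st.2.1.insert key (st.2.1.getD key 0 + 1) else st.2.1,
   if st.2.2.contains key then st.2.2.insert key (st.2.2.getD key 0 + 1) else st.2.2)
def pvLineA (st : PySem.Dict String Int × PySem.Dict String Int × PySem.Dict String Int)
    (line : String) :
    PySem.Dict String Int × PySem.Dict String Int × PySem.Dict String Int :=
  (PySem.List.pyRange 2 (PySem.List.len (PySem.Str.split₀ line)) 1).foldl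
    (pvKeyStep (PySem.Str.split₀ line)) st
def pvStepA (phonemes : List String)
    (st : PySem.Dict String Int × PySem.Dict String Int × PySem.Dict String Int) (i : Int) :
    PySem.Dict String Int × PySem.Dict String Int × PySem.Dict String Int :=
  pvLineA st (PySem.List.pyGetD phonemes i "")

-- B's per-key counting update and B's loop body
def pvIns (d : PySem.Dict String Int) (x : String) : PySem.Dict String Int :=
  d.insert x (d.getD x 0 + 1)
def pvLineB (counts : PySem.Dict String Int) (line : String) : PySem.Dict String Int :=
  let w := PySem.Str.split₀ line
  ((w.zip (PySem.List.slice w (some 1) none)).zip (PySem.List.slice w (some 2) none)).foldl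
    (fun counts t =>
      let k := t.1.1 ++ " " ++ t.1.2 ++ " " ++ t.2
      counts.insert k (counts.getD k 0 + 1)) counts

-- the three universes have no duplicate keys
theorem pvUniv_nodup_of_map_dec (xs ys zs : List String)
    (h : (pvUniv xs ys zs).map pvDec = pvTriples xs ys zs)
    (hx : xs.Nodup) (hy : ys.Nodup) (hz : zs.Nodup) : (pvUniv xs ys zs).Nodup := by
  apply List.Nodup.of_map pvDec
  rw [h]
  have : pvTriples xs ys zs = xs ×ˢ (ys ×ˢ zs) := by
    simp [List.product, SProd.sprod, List.map_flatMap, List.map_map, pvTriples,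
      Function.comp_def]
  rw [this]
  exact List.Nodup.product hx (List.Nodup.product hy hz)

set_option maxHeartbeats 4000000 in
theorem nodup_univ1 : (pvUniv silentFricativePlosiveConsonant phoneVowel silentFricativePlosiveConsonant).Nodup :=
  pvUniv_nodup_of_map_dec _ _ _ (by decide) (by decide) (by decide) (by decide)
set_option maxHeartbeats 2000000 in
theorem nodup_univ2 : (pvUniv nasalConsonant phoneVowel nasalConsonant).Nodup :=
  pvUniv_nodup_of_map_dec _ _ _ (by decide) (by decide) (by decide) (by decide)
theorem nodup_univ3 : (pvUniv phoneVowel halfVowel phoneVowel).Nodup :=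
  pvUniv_nodup_of_map_dec _ _ _ (by decide) (by decide) (by decide) (by decide)

-- A's init loops build exactly the universe keys, each with value 0
theorem init_items (xs ys zs : List String) (hnd : (pvUniv xs ys zs).Nodup) :
    (pvInit xs ys zs).items = (pvUniv xs ys zs).map (fun k => (k, (0 : Int))) := by
  have h3 : ∀ (a b : String) (d : PySem.Dict String Int),
      List.foldl (fun d k => d.insert (a ++ " " ++ b ++ " " ++ PySem.List.pyGetD zs k "") 0) d
        (PySem.List.pyRange 0 (zs.length : Int) 1)
      = List.foldl (fun d c => d.insert (a ++ " " ++ b ++ " " ++ c) 0) d zs := fun a b d =>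
    PySem.List.foldl_pyRange_zero_pyGetD' zs "" (fun d c => d.insert (a ++ " " ++ b ++ " " ++ c) 0) d
  have h2 : ∀ (a : String) (d : PySem.Dict String Int),
      List.foldl (fun d j => List.foldl (fun d c =>
          d.insert (a ++ " " ++ PySem.List.pyGetD ys j "" ++ " " ++ c) 0) d zs) d
        (PySem.List.pyRange 0 (ys.length : Int) 1)
      = List.foldl (fun d b => List.foldl (fun d c =>
          d.insert (a ++ " " ++ b ++ " " ++ c) 0) d zs) d ys := fun a d =>
    PySem.List.foldl_pyRange_zero_pyGetD' ys "" (fun d b => List.foldl (fun d c =>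
      d.insert (a ++ " " ++ b ++ " " ++ c) 0) d zs) d
  have h1 : ∀ (d : PySem.Dict String Int),
      List.foldl (fun d i => List.foldl (fun d b => List.foldl (fun d c =>
          d.insert (PySem.List.pyGetD xs i "" ++ " " ++ b ++ " " ++ c) 0) d zs) d ys) d
        (PySem.List.pyRange 0 (xs.length : Int) 1)
      = List.foldl (fun d a => List.foldl (fun d b => List.foldl (fun d c =>
          d.insert (a ++ " " ++ b ++ " " ++ c) 0) d zs) d ys) d xs := fun d =>
    PySem.List.foldl_pyRange_zero_pyGetD' xs "" (fun d a => List.foldl (fun d b =>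
      List.foldl (fun d c => d.insert (a ++ " " ++ b ++ " " ++ c) 0) d zs) d ys) d
  simp only [pvInit, PySem.List.len]
  simp only [h3, h2, h1]
  have step := PySem.Dict.items_foldl_insert_fresh (pvUniv xs ys zs) (fun k => k) (fun _ => (0 : Int))
      PySem.Dict.empty (by intro a _; simp) (by simpa using hnd)
  simp only [pvUniv, List.foldl_flatMap, List.foldl_map, pvKey3] at step
  simpa [pvUniv, pvKey3] using step

theorem init_keys_nodup (xs ys zs : List String) (hnd : (pvUniv xs ys zs).Nodup) :
    (pvInit xs ys zs).keys.Nodup := by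
  simp only [PySem.Dict.keys, init_items xs ys zs hnd, List.map_map]
  simpa [Function.comp_def] using hnd

-- the A-scan over a key list, at the items level
theorem scan_items (ws : List String) (d : PySem.Dict String Int) (h : d.keys.Nodup) :
    (ws.foldl pvUpd d).items
    = d.items.map (fun p => (p.1, p.2 + (ws.count p.1 : Int))) := by
  induction ws generalizing d with
  | nil => simp
  | cons x ws ih =>
    simp only [List.foldl_cons, pvUpd]
    by_cases hx : d.contains x
    · rw [if_pos hx]
      rw [ih _ (by rw [PySem.Dict.keys_insert_of_contains _ _ hx]; exact h)]
      rw [PySem.Dict.items_insert_of_contains _ _ hx, List.map_map]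
      apply List.map_congr_left
      intro p hp
      have hpd : d.getD p.1 0 = p.2 := PySem.Dict.getD_of_mem_items _ (by simpa using hp) h 0
      by_cases hpe : p.1 = x
      · simp [beq_iff_eq, hpd, ← hpe]
        ring
      · simp [beq_iff_eq, hpe, Ne.symm hpe]
    · rw [if_neg hx]
      rw [ih _ h]
      apply List.map_congr_left
      intro p hp
      have hpk : p.1 ≠ x := by
        intro he
        apply hx
        rw [PySem.Dict.contains_iff_mem_keys, ← he]
        exact List.mem_map_of_mem hp
      simp [Ne.symm hpk]

-- A's index-driven window keys are B's zip-driven window keys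
theorem winKeys_eq (w : List String) :
    (PySem.List.pyRange 2 (PySem.List.len w) 1).map (fun j =>
      PySem.List.pyGetD w (j - 2) "" ++ " " ++ PySem.List.pyGetD w (j - 1) "" ++ " " ++
        PySem.List.pyGetD w j "")
    = pvWinKeys w := by
  apply List.ext_getElem
  · simp [pvWinKeys, PySem.List.length_pyRange_one, PySem.List.len]
    omega
  · intro i h1 h2
    have hi2 : i + 2 < w.length := by
      simp [pvWinKeys] at h2
      omega
    simp only [pvWinKeys, List.getElem_map, PySem.List.getElem_pyRange_one,
      List.getElem_zip, List.getElem_drop]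
    have e0 : (2 : Int) + (i : Int) - 2 = ((i : Nat) : Int) := by omega
    have e1 : (2 : Int) + (i : Int) - 1 = (((i + 1 : Nat)) : Int) := by omega
    have e2 : (2 : Int) + (i : Int) = (((i + 2 : Nat)) : Int) := by omega
    rw [e0, e1, e2]
    simp only [PySem.List.pyGetD_natCast]
    rw [List.getD_eq_getElem _ _ (by omega), List.getD_eq_getElem _ _ (by omega),
      List.getD_eq_getElem _ _ (by omega)]
    have c1 : 1 + i = i + 1 := by omega
    have c2 : 2 + i = i + 2 := by omega
    simp only [c1, c2]

-- splitting the parallel triple fold into three independent folds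
theorem foldl_updT_split (l : List String)
    (a b c : PySem.Dict String Int) :
    l.foldl pvUpdT (a, b, c) = (l.foldl pvUpd a, l.foldl pvUpd b, l.foldl pvUpd c) := by
  induction l generalizing a b c with
  | nil => rfl
  | cons x l ih => simp [pvUpdT, ih]

-- A's inner index loop is a fold of the triple update over the window keys
theorem lineA_eq (w : List String)
    (st : PySem.Dict String Int × PySem.Dict String Int × PySem.Dict String Int) :
    (PySem.List.pyRange 2 (PySem.List.len w) 1).foldl (pvKeyStep w) st
    = (pvWinKeys w).foldl pvUpdT st := by
  rw [← winKeys_eq w, List.foldl_map]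
  rfl

-- A's whole scan, flattened to one fold per dict
theorem scanA_eq (phonemes : List String)
    (d1 d2 d3 : PySem.Dict String Int) :
    (PySem.List.pyRange 0 (PySem.List.len phonemes) 1).foldl (pvStepA phonemes) (d1, d2, d3)
    = ((pvWs phonemes).foldl pvUpd d1, (pvWs phonemes).foldl pvUpd d2,
       (pvWs phonemes).foldl pvUpd d3) := by
  have houter : (PySem.List.pyRange 0 (PySem.List.len phonemes) 1).foldl
      (pvStepA phonemes) (d1, d2, d3)
      = phonemes.foldl pvLineA (d1, d2, d3) :=
    PySem.List.foldl_pyRange_zero_pyGetD' phonemes "" pvLineA (d1, d2, d3)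
  rw [houter]
  have hl : pvLineA = fun st line => (pvWinKeys (PySem.Str.split₀ line)).foldl pvUpdT st :=
    funext fun st => funext fun line => lineA_eq (PySem.Str.split₀ line) st
  rw [hl]
  rw [← List.foldl_flatMap]
  rw [show (phonemes.flatMap fun line => pvWinKeys (PySem.Str.split₀ line)) = pvWs phonemes
    from rfl]
  exact foldl_updT_split _ _ _ _

-- B's per-line zip loop is a fold of the counting update over the same window keys
theorem lineB_eq (line : String) (counts : PySem.Dict String Int) :
    pvLineB counts line = (pvWinKeys (PySem.Str.split₀ line)).foldl pvIns counts := by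
  have s1 : PySem.List.slice (PySem.Str.split₀ line) (some 1) none
      = (PySem.Str.split₀ line).drop 1 := by
    simpa using PySem.List.slice_from (PySem.Str.split₀ line) (a := 1) (by norm_num)
  have s2 : PySem.List.slice (PySem.Str.split₀ line) (some 2) none
      = (PySem.Str.split₀ line).drop 2 := by
    simpa using PySem.List.slice_from (PySem.Str.split₀ line) (a := 2) (by norm_num)
  simp only [pvLineB, s1, s2, pvWinKeys, List.foldl_map]
  rfl

-- B's counter holds exactly the window counts
theorem counts_getD (phonemes : List String) (k : String) :
    (phonemes.foldl pvLineB PySem.Dict.empty).getD k 0 = ((pvWs phonemes).count k : Int) := by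
  have hl : pvLineB = fun counts line => (pvWinKeys (PySem.Str.split₀ line)).foldl pvIns counts :=
    funext fun counts => funext fun line => lineB_eq line counts
  rw [hl, ← List.foldl_flatMap]
  rw [show (phonemes.flatMap fun line => pvWinKeys (PySem.Str.split₀ line)) = pvWs phonemes
    from rfl]
  have h := PySem.Dict.getD_foldl_insert_add_one (pvWs phonemes)
    (PySem.Dict.empty : PySem.Dict String Int) k
  rw [show pvIns = fun d x => d.insert x (d.getD x 0 + 1) from rfl]
  simpa using h

-- each of B's universe builds, in map form
theorem mkUniv_eq (counts : PySem.Dict String Int) (xs ys zs : List String) :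
    pvMkUniv counts xs ys zs
    = (pvUniv xs ys zs).map (fun k => (k, counts.getD k 0)) := by
  simp [pvMkUniv, pvUniv, pvKey3, List.map_flatMap, List.map_map, Function.comp_def]

-- one fully counted dict of A equals one universe build of B
theorem component_eq (phonemes : List String) (xs ys zs : List String)
    (hnd : (pvUniv xs ys zs).Nodup) :
    ((pvWs phonemes).foldl pvUpd (pvInit xs ys zs)).items
    = pvMkUniv (phonemes.foldl pvLineB PySem.Dict.empty) xs ys zs := by
  rw [scan_items _ _ (init_keys_nodup xs ys zs hnd), init_items xs ys zs hnd, mkUniv_eq,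
    List.map_map]
  apply List.map_congr_left
  intro k _
  simp [counts_getD]

-- ===== VERDICT (by name: the statement is the Claim_ definition above) =====
theorem count_phoneme_chain3_spec : Claim_equal_count_phoneme_chain3 := by
  intro phonemes _
  unfold Spec_count_phoneme_chain3
  have hA : count_phoneme_chain3 phonemes
      = (((PySem.List.pyRange 0 (PySem.List.len phonemes) 1).foldl (pvStepA phonemes)
            (pvInit silentFricativePlosiveConsonant phoneVowel silentFricativePlosiveConsonant,
             pvInit nasalConsonant phoneVowel nasalConsonant,
             pvInit phoneVowel halfVowel phoneVowel)).1.items,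
         ((PySem.List.pyRange 0 (PySem.List.len phonemes) 1).foldl (pvStepA phonemes)
            (pvInit silentFricativePlosiveConsonant phoneVowel silentFricativePlosiveConsonant,
             pvInit nasalConsonant phoneVowel nasalConsonant,
             pvInit phoneVowel halfVowel phoneVowel)).2.1.items,
         ((PySem.List.pyRange 0 (PySem.List.len phonemes) 1).foldl (pvStepA phonemes)
            (pvInit silentFricativePlosiveConsonant phoneVowel silentFricativePlosiveConsonant,
             pvInit nasalConsonant phoneVowel nasalConsonant,
             pvInit phoneVowel halfVowel phoneVowel)).2.2.items) := rfl
  have hB : count_phoneme_chain3_alt phonemes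
      = (pvMkUniv (phonemes.foldl pvLineB PySem.Dict.empty)
           silentFricativePlosiveConsonant phoneVowel silentFricativePlosiveConsonant,
         pvMkUniv (phonemes.foldl pvLineB PySem.Dict.empty)
           nasalConsonant phoneVowel nasalConsonant,
         pvMkUniv (phonemes.foldl pvLineB PySem.Dict.empty)
           phoneVowel halfVowel phoneVowel) := rfl
  rw [hA, hB, scanA_eq]
  exact Prod.ext (component_eq _ _ _ _ nodup_univ1)
    (Prod.ext (component_eq _ _ _ _ nodup_univ2) (component_eq _ _ _ _ nodup_univ3))
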